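-- pv_equiv track=rewrite | github.com/DuarteDvv/indexer_and_query_process | util_processor.py | unary_decode
-- ===== SOURCE A (Python) =====
-- def unary_decode(code: str) -> int:
--    if '1' not in code:
--       raise ValueError("Invalid unary code: missing terminator '1'.")
--
--    count = 0
--    for char in code:
--       if char == '0':
--          count += 1
--       elif char == '1':
--          break
--       else:
--          raise ValueError(f"Invalid character '{char}' in unary code.")
--
--    return count
-- ===== SOURCE B (Python) =====
-- def unary_decode(code: str) -> int:
--    prefix, sep, _ = code.partition('1')
--    if not sep:
--       raise ValueError("Invalid unary code: missing terminator '1'.")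
--    junk = prefix.lstrip('0')
--    if junk:
--       raise ValueError(f"Invalid character '{junk[0]}' in unary code.")
--    return len(prefix)
-- ===== Notes on version B (the rewrite author's own statement) =====
-- stated objective: idiomatic
-- what changed: B is loop-free: str.partition('1') splits off the prefix before the terminator, lstrip('0') detects the first invalid character, and len(prefix) is the answer, replacing A's explicit count-and-break scan.
import Mathlib
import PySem

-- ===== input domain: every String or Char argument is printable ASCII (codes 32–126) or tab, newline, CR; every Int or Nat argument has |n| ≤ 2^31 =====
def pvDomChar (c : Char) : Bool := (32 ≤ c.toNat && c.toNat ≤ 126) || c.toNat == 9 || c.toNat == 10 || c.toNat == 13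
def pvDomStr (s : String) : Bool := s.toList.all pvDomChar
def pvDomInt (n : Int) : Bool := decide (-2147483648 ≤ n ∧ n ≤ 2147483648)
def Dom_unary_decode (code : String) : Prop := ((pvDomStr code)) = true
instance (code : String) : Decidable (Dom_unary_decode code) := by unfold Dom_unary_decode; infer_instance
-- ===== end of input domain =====

-- B is loop-free: partition('1') + lstrip('0') + len replace A's count-and-break scan;
-- objective: idiomatic decomposition (no speed claim).

-- ===== PORT A =====
-- A's for-loop with break: count '0's, stop at '1'; the bad-character branch raises
-- (excluded by Pre_, the port returns 0 there).
def unaryLoopA : List Char → Int → Int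
  | [], count => count
  | c :: rest, count =>
    if c = '0' then unaryLoopA rest (count + 1)
    else if c = '1' then count
    else 0  -- raise ValueError (outside Pre_)

def unary_decode (code : String) : Int :=
  if PySem.Str.isIn "1" code = false then 0  -- raise ValueError (outside Pre_)
  else unaryLoopA code.toList 0

-- ===== PORT B =====
-- code.partition('1'): since the separator is a single char, the prefix is
-- takeWhile (≠ '1') and sep-with-suffix is dropWhile (≠ '1') (exact for a 1-char sep);
-- prefix.lstrip('0') is dropWhile (= '0') (exact: lstrip with an explicit char set).
def unary_decode_alt (code : String) : Int :=
  let pre := code.toList.takeWhile (fun c => c != '1')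
  let rest := code.toList.dropWhile (fun c => c != '1')
  if rest.isEmpty then 0  -- raise ValueError: missing terminator (outside Pre_)
  else
    let junk := pre.dropWhile (fun c => c == '0')
    if !junk.isEmpty then 0  -- raise ValueError: invalid character (outside Pre_)
    else (pre.length : Int)

-- ===== PRECONDITION & SPEC =====
-- Pre_ = exactly where the Python returns: a '1' is present and every character before the
-- first '1' is '0' (characters after the terminator are never inspected by A).
def Pre_unary_decode (code : String) : Prop :=
  '1' ∈ code.toList ∧
  (code.toList.takeWhile (fun c => c != '1')).all (fun c => c == '0') = true
instance (code : String) : Decidable (Pre_unary_decode code) := by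
  unfold Pre_unary_decode; infer_instance

def pvWitness_unary_decode : String := "01"

def Spec_unary_decode (code : String) (out : Int) : Prop := out = unary_decode_alt code
instance (code : String) (out : Int) : Decidable (Spec_unary_decode code out) := by
  unfold Spec_unary_decode; infer_instance

-- ===== CLAIM (what is proved, stated in full; the proofs are below) =====
def Claim_equal_unary_decode : Prop :=
  ∀ (code : String), Dom_unary_decode code → Pre_unary_decode code →
    Spec_unary_decode code (unary_decode code)

-- ===== LEMMAS AND PROOFS =====

lemma singleton_infix_of_mem {a : Char} {xs : List Char} (h : a ∈ xs) : [a] <:+: xs := by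
  obtain ⟨s, t, rfl⟩ := List.append_of_mem h
  exact ⟨s, t, by simp⟩

-- Under Pre_ (a '1' present, all-zero prefix), A's loop returns count + length of the prefix.
lemma loopA_eq (l : List Char) (count : Int)
    (hmem : '1' ∈ l)
    (hpre : ∀ c ∈ l.takeWhile (fun c => c != '1'), c = '0') :
    unaryLoopA l count = count + (l.takeWhile (fun c => c != '1')).length := by
  induction l generalizing count with
  | nil => simp at hmem
  | cons c rest ih =>
    by_cases hc1 : c = '1'
    · subst hc1
      simp [unaryLoopA]
    · rw [List.takeWhile_cons_of_pos (by simpa using hc1)] at hpre ⊢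
      have hc0 : c = '0' := hpre c (by simp)
      have hmem' : '1' ∈ rest := by
        rcases List.mem_cons.mp hmem with h | h
        · exact absurd h.symm hc1
        · exact h
      have := ih (count + 1) hmem' (fun c' hc' => hpre c' (List.mem_cons_of_mem _ hc'))
      simp only [unaryLoopA, if_pos hc0, this, List.length_cons]
      push_cast; ring

-- ===== VERDICT (by name: the statement is the Claim_ definition above) =====
theorem unary_decode_spec : Claim_equal_unary_decode := by
  intro code _ hpre
  obtain ⟨hmem, hprefb⟩ := hpre
  have hpref : ∀ c ∈ code.toList.takeWhile (fun c => c != '1'), c = '0' := by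
    intro c hc
    have := List.all_eq_true.mp hprefb c hc
    simpa using this
  unfold Spec_unary_decode unary_decode unary_decode_alt
  have hin : PySem.Str.isIn "1" code = true := by
    rw [PySem.Str.isIn_iff_infix]
    exact singleton_infix_of_mem (by simpa using hmem)
  rw [hin]
  simp only [Bool.true_eq_false, if_false]
  have hrest : (code.toList.dropWhile (fun c => c != '1')).isEmpty = false := by
    rcases h : code.toList.dropWhile (fun c => c != '1') with _ | _
    · exfalso
      have := List.dropWhile_eq_nil_iff.mp h '1' hmem
      simp at this
    · simp
  rw [hrest]
  have hjunk : ((code.toList.takeWhile (fun c => c != '1')).dropWhile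
      (fun c => c == '0')).isEmpty = true := by
    have : (code.toList.takeWhile (fun c => c != '1')).dropWhile (fun c => c == '0') = [] :=
      List.dropWhile_eq_nil_iff.mpr (fun c hc => by simp [hpref c hc])
    simp [this]
  simp only [hjunk, Bool.not_true, Bool.false_eq_true, if_false]
  rw [loopA_eq code.toList 0 hmem hpref]; ring
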